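-- pv_equiv track=rewrite | github.com/BenDeJonge/BioinformaticsAlgorithms | Chapter01/Ex_01_04_05_ClumpFinding/e_coli.py | fast_clump_finding
-- ===== SOURCE A (Python) =====
-- def positions_table(genome : str, length : int) -> dict[str, list[int]]:
--     '''
--     Given a genome, return the starting positions of all fragments with a given
--     length as a dictionary.
--
--     Parameters
--     ----------
--     genome : str
--         The genome to search in.
--     length : int
--         The exact fragment length to search for.
--
--     Returns
--     -------
--     dict[str, list[int]]
--         A table of all fragments of a given length and their starting indices.
--     '''
--     table = {}
--     for i in range(len(genome) - length + 1):
--         pattern = genome[ i : i + length]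
--         try:
--             table[pattern].append(i)
--         except KeyError:
--             table[pattern] = [i]
--     return table
--
-- def is_clump(positions : list[int], length : int,
--              window    : int,       counts : int) -> bool:
--     '''
--     Check if any subset of the positions, of size equal to the expected counts,
--     falls inside the same window of the genome.
--
--     Example: 4 positions [p1, p2, p3, p4], indicating patterns of length L.
--               Looking for 3 counts inside window of size W.
--               Loop 4 - 3 + 1 = 2 times.
--
--     Loop0 : Check if [p1, p2, p3] are inside the same window.
--     positions[0 + 3 - 1] = p3 vs positions[0] = p1
--     Check if p3 - p1 <= W - L
--     If ok, the positions correspond to a clump. If not, try the next loop.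
--
--     Loop1 : Check if [p2, p3, p4] are inside the same window.
--     positions[1 + 3 - 1] = p4 vs positions[1] = p2
--     Check if p4 - p1 <= W - L
--     If ok, the positions correspond to a clump. If not, they dont.
--
--
--     Parameters
--     ----------
--     positions : list[int]
--         A list of all starting indices of the pattern.
--     length : int
--         The length of the pattern.
--     window : int
--         The window size to search inside the genome.
--     counts : int
--         The minimal amount of occurences of the pattern in the window.
--
--     Returns
--     -------
--     bool
--         If the pattern is a clump (True) or not (False).
--     '''
--     for i in range(len(positions) - counts + 1):
--         if positions[i + counts - 1] - positions[i] <= window - length: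
--             return True
--     return False
--
-- def fast_clump_finding(genome : str, length : int,
--                        window : int, counts : int) -> set[str]:
--     '''
--     Given a genome, look for patterns of a given length inside a genome window
--     that appear at least a given amount of counts.
--
--     Parameters
--     ----------
--     genome : str
--         The genome to search in.
--     length : int
--         The exact fragment length to search for.
--     window : int
--         The window size to search inside the genome.
--     counts : int
--         The minimal amount of occurences of the pattern in the window.
--
--     Returns
--     -------
--     set[str]
--         A set of all patterns that are found as clumps in the genome.
--     '''
--     pt = positions_table(genome, length)
--     clumps = set()
--     for pattern, positions in pt.items():
--         if len(positions) >= counts: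
--             if is_clump(positions, length, window, counts):
--                 clumps.add(pattern)
--     return clumps
-- ===== SOURCE B (Python) =====
-- def fast_clump_finding(genome : str, length : int,
--                        window : int, counts : int) -> set[str]:
--     '''
--     Scan the genome once per distinct pattern: at each pattern's first
--     occurrence, walk the remaining genome collecting its occurrences and stop
--     as soon as `counts` of them fit in one window (the newest occurrence and
--     the one `counts - 1` places before it span at most `window - length`).
--     '''
--     n = len(genome)
--     clumps = set()
--     seen = set()
--     for i in range(n - length + 1):
--         pattern = genome[i:i + length]
--         if pattern in seen:
--             continue
--         seen.add(pattern)
--         occ = []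
--         for j in range(i, n - length + 1):
--             if genome[j:j + length] == pattern:
--                 occ.append(j)
--                 if len(occ) >= counts and j - occ[len(occ) - counts] <= window - length:
--                     clumps.add(pattern)
--                     break
--     return clumps
-- ===== Notes on version B (the rewrite author's own statement) =====
-- stated objective: alternative
-- what changed: B drops A's global pattern->positions table and post-hoc fixed-offset scan; instead it processes each distinct k-mer once at its first occurrence, rescanning the genome online while collecting that k-mer's occurrences and stopping as soon as the newest occurrence and the one counts-1 places before it fit in one window.
-- outside the precondition, e.g. on fast_clump_finding('AA', 1, 5, 0): A returns {'A'}, B raises IndexError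
import Mathlib
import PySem

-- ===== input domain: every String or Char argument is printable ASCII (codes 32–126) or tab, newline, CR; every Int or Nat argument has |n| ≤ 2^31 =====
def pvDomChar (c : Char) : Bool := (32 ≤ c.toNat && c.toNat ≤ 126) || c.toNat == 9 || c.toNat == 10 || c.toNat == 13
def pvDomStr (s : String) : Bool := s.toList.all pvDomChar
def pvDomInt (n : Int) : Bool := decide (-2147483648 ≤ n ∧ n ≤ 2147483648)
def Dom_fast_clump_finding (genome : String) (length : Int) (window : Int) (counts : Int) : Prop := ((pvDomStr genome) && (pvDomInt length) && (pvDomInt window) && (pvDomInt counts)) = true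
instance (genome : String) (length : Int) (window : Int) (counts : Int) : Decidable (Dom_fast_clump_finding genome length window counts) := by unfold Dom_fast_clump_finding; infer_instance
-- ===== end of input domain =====

-- B replaces A's global positions table by a per-distinct-pattern online scan (alternative
-- decomposition, same results); equivalence is about the returned set only.

-- ===== PORT A =====
def positions_table (genome : String) (length : Int) : PySem.Dict String (List Int) :=
  (PySem.List.pyRange 0 (PySem.Str.len genome - length + 1) 1).foldl
    (fun table i =>
      -- try: table[pattern].append(i)  except KeyError: table[pattern] = [i]
      table.modify (PySem.Str.slice genome (some i) (some (i + length))) [] (· ++ [i]))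
    PySem.Dict.empty

def is_clump (positions : List Int) (length : Int) (window : Int) (counts : Int) : Bool :=
  -- for i in range(...): if positions[i+counts-1] - positions[i] <= window - length: return True
  (PySem.List.pyRange 0 ((positions.length : Int) - counts + 1) 1).any
    (fun i => decide (PySem.List.pyGetD positions (i + counts - 1) 0
                        - PySem.List.pyGetD positions i 0 ≤ window - length))

def fast_clump_finding (genome : String) (length : Int) (window : Int) (counts : Int) : List String :=
  let pt := positions_table genome length
  pt.items.foldl
    (fun clumps pr =>
      if counts ≤ (pr.2.length : Int) then
        if is_clump pr.2 length window counts then PySem.Set.add clumps pr.1 else clumps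
      else clumps)
    PySem.Set.empty

-- ===== PORT B =====
-- inner loop body: occurrences collected in st.1, st.2 = true once the loop has broken
def altStep2 (genome : String) (length : Int) (window : Int) (counts : Int) (pattern : String)
    (st : List Int × Bool) (j : Int) : List Int × Bool :=
  if st.2 then st
  else if PySem.Str.slice genome (some j) (some (j + length)) == pattern then
    let occ := st.1 ++ [j]
    if counts ≤ (occ.length : Int) ∧
        j - PySem.List.pyGetD occ ((occ.length : Int) - counts) 0 ≤ window - length then
      (occ, true)
    else (occ, false)
  else st

def fast_clump_finding_alt (genome : String) (length : Int) (window : Int) (counts : Int) : List String :=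
  let n := PySem.Str.len genome
  ((PySem.List.pyRange 0 (n - length + 1) 1).foldl
    (fun st i =>
      let pattern := PySem.Str.slice genome (some i) (some (i + length))
      if PySem.Set.contains st.2 pattern then st
      else
        let seen := PySem.Set.add st.2 pattern
        let inner := (PySem.List.pyRange i (n - length + 1) 1).foldl
          (altStep2 genome length window counts pattern) ([], false)
        ((if inner.2 then PySem.Set.add st.1 pattern else st.1), seen))
    ((PySem.Set.empty : PySem.Set String), (PySem.Set.empty : PySem.Set String))).1

-- ===== PRECONDITION & SPEC =====
-- Pre_ excludes counts ≤ 0 on genomes with at least one k-mer start: there A's is_clump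
-- indexes positions[i] with i = len(positions) (IndexError) unless a negative-index-wraparound
-- comparison happens to return True first, while B raises at its own occ[len(occ)-counts].
def Pre_fast_clump_finding (genome : String) (length : Int) (window : Int) (counts : Int) : Prop :=
  1 ≤ counts ∨ PySem.Str.len genome - length + 1 ≤ 0
instance (genome : String) (length : Int) (window : Int) (counts : Int) : Decidable (Pre_fast_clump_finding genome length window counts) := by unfold Pre_fast_clump_finding; infer_instance

def pvWitness_fast_clump_finding : String × Int × Int × Int := ("ACAC", 2, 4, 2)

def Spec_fast_clump_finding (genome : String) (length : Int) (window : Int) (counts : Int) (out : List String) : Prop := out = fast_clump_finding_alt genome length window counts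
instance (genome : String) (length : Int) (window : Int) (counts : Int) (out : List String) : Decidable (Spec_fast_clump_finding genome length window counts out) := by unfold Spec_fast_clump_finding; infer_instance

-- ===== CLAIM (what is proved, stated in full; the proofs are below) =====
def Claim_equal_fast_clump_finding : Prop := ∀ (genome : String) (length : Int) (window : Int) (counts : Int), Dom_fast_clump_finding genome length window counts → Pre_fast_clump_finding genome length window counts → Spec_fast_clump_finding genome length window counts (fast_clump_finding genome length window counts)

-- ===== LEMMAS AND PROOFS =====

-- the k-mer starting at i, the index range both programs scan, and the occurrence list of p
def pvKmer (genome : String) (length : Int) (i : Int) : String :=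
  PySem.Str.slice genome (some i) (some (i + length))
def pvRangeE (genome : String) (length : Int) : List Int :=
  PySem.List.pyRange 0 (PySem.Str.len genome - length + 1) 1
def pvPos (genome : String) (length : Int) (p : String) : List Int :=
  (pvRangeE genome length).filter (fun i => pvKmer genome length i == p)

-- "some counts consecutive occurrences of p span at most window - length"
def pvCond (length window counts : Int) (pos : List Int) : Prop :=
  ∃ k : Int, 0 ≤ k ∧ k < (pos.length : Int) ∧ counts ≤ k + 1 ∧
    PySem.List.pyGetD pos k 0 - PySem.List.pyGetD pos (k + 1 - counts) 0 ≤ window - length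
def pvCondB (length window counts : Int) (pos : List Int) : Bool :=
  (PySem.List.pyRange 0 (pos.length : Int) 1).any
    (fun k => decide (counts ≤ k + 1 ∧
      PySem.List.pyGetD pos k 0 - PySem.List.pyGetD pos (k + 1 - counts) 0 ≤ window - length))

theorem pvCondB_iff (length window counts : Int) (pos : List Int) :
    pvCondB length window counts pos = true ↔ pvCond length window counts pos := by
  unfold pvCondB pvCond
  simp only [List.any_eq_true, PySem.List.mem_pyRange_one, decide_eq_true_eq]
  constructor
  · rintro ⟨k, ⟨h0, h1⟩, h2, h3⟩; exact ⟨k, h0, h1, h2, h3⟩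
  · rintro ⟨k, h0, h1, h2, h3⟩; exact ⟨k, ⟨h0, h1⟩, h2, h3⟩

theorem foldl_add_if_eq_filter {p : String → Bool} :
    ∀ (l s0 : List String), l.Nodup → (∀ x ∈ l, x ∉ s0) →
      l.foldl (fun s x => if p x then PySem.Set.add s x else s) s0 = s0 ++ l.filter p := by
  intro l
  induction l with
  | nil => intro s0 _ _; simp
  | cons a l ih =>
    intro s0 hnd hno
    simp only [List.foldl_cons]
    rcases List.nodup_cons.mp hnd with ⟨ha, hl⟩
    by_cases hp : p a
    · rw [if_pos hp, PySem.Set.add_of_not_mem (hno a (by simp))]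
      rw [ih (s0 ++ [a]) hl (by intro x hx; simp only [List.mem_append, List.mem_singleton, not_or]; exact ⟨hno x (by simp [hx]), fun h => ha (h ▸ hx)⟩)]
      simp [hp]
    · rw [if_neg (by simpa using hp), ih s0 hl (fun x hx => hno x (by simp [hx]))]
      simp [hp]

theorem fast_eq_filter (genome : String) (length window counts : Int) :
    fast_clump_finding genome length window counts =
      (PySem.Set.ofList ((pvRangeE genome length).map (pvKmer genome length))).filter
        (fun p => decide (counts ≤ ((pvPos genome length p).length : Int)) &&
                   is_clump (pvPos genome length p) length window counts) := by
  have hpt : positions_table genome length =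
      (pvRangeE genome length).foldl
        (fun table i => table.modify (pvKmer genome length i) [] (· ++ [i])) PySem.Dict.empty := rfl
  have hk : (positions_table genome length).keys =
      PySem.Set.ofList ((pvRangeE genome length).map (pvKmer genome length)) := by
    rw [hpt]
    rw [PySem.Dict.keys_foldl_modify_key (pvRangeE genome length) (pvKmer genome length) []
      (fun _ i => (· ++ [i]))]
    simp [PySem.Set.update_nil_left]
  have hnd : (positions_table genome length).keys.Nodup := by
    rw [hpt]
    exact PySem.Dict.nodup_keys_foldl_modify_key _ _ _ _ _ (by simp)
  have hgd : ∀ p, (positions_table genome length).getD p [] = pvPos genome length p := by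
    intro p
    rw [hpt]
    rw [show ((pvRangeE genome length).foldl
        (fun table i => table.modify (pvKmer genome length i) [] (· ++ [i])) PySem.Dict.empty)
      = (((pvRangeE genome length).map (fun i => (pvKmer genome length i, i))).foldl
          (fun d pr => d.modify pr.1 [] (· ++ [pr.2])) PySem.Dict.empty) from
      (List.foldl_map (f := fun i => (pvKmer genome length i, i))
        (g := fun (d : PySem.Dict String (List Int)) pr => d.modify pr.1 [] (· ++ [pr.2]))
        (l := pvRangeE genome length) (init := PySem.Dict.empty)).symm]
    rw [PySem.Dict.getD_foldl_modify_append]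
    rw [List.filter_map]
    simp [pvPos, Function.comp_def]
  show ((positions_table genome length).items.foldl
      (fun clumps pr =>
        if counts ≤ (pr.2.length : Int) then
          if is_clump pr.2 length window counts then PySem.Set.add clumps pr.1 else clumps
        else clumps)
      PySem.Set.empty) = _
  rw [PySem.Dict.items_eq_map_keys _ hnd []]
  rw [List.foldl_map]
  rw [show (fun (clumps : PySem.Set String) k =>
        if counts ≤ (((positions_table genome length).getD k []).length : Int) then
          if is_clump ((positions_table genome length).getD k []) length window counts then
            PySem.Set.add clumps k
          else clumps
        else clumps)
      = (fun (clumps : PySem.Set String) k =>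
          if (decide (counts ≤ (((positions_table genome length).getD k []).length : Int)) &&
              is_clump ((positions_table genome length).getD k []) length window counts) then
            PySem.Set.add clumps k
          else clumps) from by
    funext clumps k
    by_cases h1 : counts ≤ (((positions_table genome length).getD k []).length : Int) <;>
      by_cases h2 : is_clump ((positions_table genome length).getD k []) length window counts <;>
      simp [h1, h2]]
  rw [foldl_add_if_eq_filter _ PySem.Set.empty (hk ▸ PySem.Set.nodup_ofList _) (by simp [PySem.Set.empty])]
  rw [show (PySem.Set.empty : PySem.Set String) = [] from rfl, List.nil_append, hk]
  exact List.filter_congr (fun p _ => by rw [hgd p])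

theorem altStep2_absorb (genome : String) (length window counts : Int) (pattern : String) :
    ∀ (js : List Int) (occ : List Int),
      js.foldl (altStep2 genome length window counts pattern) (occ, true) = (occ, true) := by
  intro js
  induction js with
  | nil => intro occ; rfl
  | cons j js ih => intro occ; simpa [altStep2] using ih occ

theorem pyGetD_append_left {α : Type} (xs ys : List α) (k : Int) (d : α)
    (h0 : 0 ≤ k) (h1 : k < (xs.length : Int)) :
    PySem.List.pyGetD (xs ++ ys) k d = PySem.List.pyGetD xs k d := by
  have hk : k.toNat < xs.length := by omega
  rw [PySem.List.pyGetD_eq_getElem _ d h0 (by simp; omega),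
      PySem.List.pyGetD_eq_getElem _ d h0 (by exact_mod_cast h1)]
  exact List.getElem_append_left hk

theorem pyGetD_append_mid {α : Type} (xs ys : List α) (y : α) (d : α) :
    PySem.List.pyGetD (xs ++ y :: ys) (xs.length : Int) d = y := by
  rw [PySem.List.pyGetD_natCast]
  simp [List.getD]

theorem inner_iff (genome : String) (length window counts : Int) (p : String) (hc : 1 ≤ counts) :
    ∀ (js : List Int) (occ : List Int),
      (js.foldl (altStep2 genome length window counts p) (occ, false)).2 = true ↔
        (∃ k : Int, (occ.length : Int) ≤ k ∧
          k < ((occ ++ js.filter (fun j => pvKmer genome length j == p)).length : Int) ∧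
          counts ≤ k + 1 ∧
          PySem.List.pyGetD (occ ++ js.filter (fun j => pvKmer genome length j == p)) k 0
            - PySem.List.pyGetD (occ ++ js.filter (fun j => pvKmer genome length j == p)) (k + 1 - counts) 0
            ≤ window - length) := by
  intro js
  induction js with
  | nil =>
    intro occ
    simp only [List.foldl_nil, List.filter_nil, List.append_nil]
    constructor
    · intro h; exact absurd h (by simp)
    · rintro ⟨k, h1, h2, _⟩; omega
  | cons j js ih =>
    intro occ
    simp only [List.foldl_cons, List.filter_cons]
    by_cases hj : (PySem.Str.slice genome (some j) (some (j + length)) == p) = true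
    · have hj' : (pvKmer genome length j == p) = true := hj
      rw [hj']
      simp only [if_true]
      have hstep : altStep2 genome length window counts p (occ, false) j =
          (if counts ≤ ((occ ++ [j]).length : Int) ∧
              j - PySem.List.pyGetD (occ ++ [j]) (((occ ++ [j]).length : Int) - counts) 0
                ≤ window - length then
            (occ ++ [j], true) else (occ ++ [j], false)) := by
        simp [altStep2, hj]
      by_cases hcond : counts ≤ ((occ ++ [j]).length : Int) ∧
          j - PySem.List.pyGetD (occ ++ [j]) (((occ ++ [j]).length : Int) - counts) 0
            ≤ window - length
      · rw [hstep, if_pos hcond, altStep2_absorb]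
        simp only [true_iff]
        have hlen1 : ((occ ++ [j]).length : Int) = (occ.length : Int) + 1 := by
          simp
        refine ⟨(occ.length : Int), le_refl _, by simp only [List.length_append, List.length_cons]; push_cast; omega, by omega, ?_⟩
        rw [show occ ++ j :: List.filter (fun j => pvKmer genome length j == p) js
              = (occ ++ [j]) ++ List.filter (fun j => pvKmer genome length j == p) js from by simp]
        have h1 : PySem.List.pyGetD ((occ ++ [j]) ++ List.filter (fun j => pvKmer genome length j == p) js)
            (occ.length : Int) 0 = j := by
          rw [pyGetD_append_left _ _ _ _ (by positivity) (by simp)]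
          simpa using pyGetD_append_mid occ [] j 0
        rw [h1]
        have h2 : PySem.List.pyGetD ((occ ++ [j]) ++ List.filter (fun j => pvKmer genome length j == p) js)
            ((occ.length : Int) + 1 - counts) 0
            = PySem.List.pyGetD (occ ++ [j]) (((occ ++ [j]).length : Int) - counts) 0 := by
          rw [pyGetD_append_left _ _ _ _ (by omega) (by simp; omega), hlen1]
        rw [h2]
        exact hcond.2
      · rw [hstep, if_neg hcond]
        rw [ih (occ ++ [j])]
        rw [show occ ++ j :: List.filter (fun j => pvKmer genome length j == p) js
              = (occ ++ [j]) ++ List.filter (fun j => pvKmer genome length j == p) js from by simp]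
        constructor
        · rintro ⟨k, h1, h2, h3, h4⟩
          exact ⟨k, by simp at h1; omega, h2, h3, h4⟩
        · rintro ⟨k, h1, h2, h3, h4⟩
          rcases lt_or_ge (occ.length : Int) k with hk | hk
          · exact ⟨k, by simp; omega, h2, h3, h4⟩
          · exfalso
            have hke : k = (occ.length : Int) := by omega
            subst hke
            apply hcond
            have hlen1 : ((occ ++ [j]).length : Int) = (occ.length : Int) + 1 := by simp
            have h1' : PySem.List.pyGetD ((occ ++ [j]) ++ List.filter (fun j => pvKmer genome length j == p) js)
                (occ.length : Int) 0 = j := by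
              rw [pyGetD_append_left _ _ _ _ (by positivity) (by simp)]
              simpa using pyGetD_append_mid occ [] j 0
            have h2' : PySem.List.pyGetD ((occ ++ [j]) ++ List.filter (fun j => pvKmer genome length j == p) js)
                ((occ.length : Int) + 1 - counts) 0
                = PySem.List.pyGetD (occ ++ [j]) (((occ ++ [j]).length : Int) - counts) 0 := by
              rw [pyGetD_append_left _ _ _ _ (by omega) (by simp; omega), hlen1]
            rw [h1', h2'] at h4
            exact ⟨by omega, h4⟩
    · have hj' : (pvKmer genome length j == p) = false := by simpa using hj
      rw [hj']
      simp only [Bool.false_eq_true, if_false]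
      have hstep : altStep2 genome length window counts p (occ, false) j = (occ, false) := by
        simp [altStep2, hj]
      rw [hstep, ih occ]

-- the body of B's outer loop, named for the induction
def pvStepO (genome : String) (length window counts : Int)
    (st : PySem.Set String × PySem.Set String) (i : Int) : PySem.Set String × PySem.Set String :=
  let pattern := pvKmer genome length i
  if PySem.Set.contains st.2 pattern then st
  else
    let seen := PySem.Set.add st.2 pattern
    let inner := (PySem.List.pyRange i (PySem.Str.len genome - length + 1) 1).foldl
      (altStep2 genome length window counts pattern) ([], false)
    ((if inner.2 then PySem.Set.add st.1 pattern else st.1), seen)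

theorem outer_inv (genome : String) (length window counts : Int) (hc : 1 ≤ counts) :
    ∀ (m : Nat) (a : Int), 0 ≤ a → (PySem.Str.len genome - length + 1 - a).toNat = m →
      (PySem.List.pyRange a (PySem.Str.len genome - length + 1) 1).foldl
          (pvStepO genome length window counts)
          ((PySem.Set.ofList ((PySem.List.pyRange 0 a 1).map (pvKmer genome length))).filter
              (fun p => pvCondB length window counts (pvPos genome length p)),
            PySem.Set.ofList ((PySem.List.pyRange 0 a 1).map (pvKmer genome length)))
        = ((PySem.Set.ofList ((PySem.List.pyRange 0 a 1
                ++ PySem.List.pyRange a (PySem.Str.len genome - length + 1) 1).map (pvKmer genome length))).filter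
              (fun p => pvCondB length window counts (pvPos genome length p)),
           PySem.Set.ofList ((PySem.List.pyRange 0 a 1
                ++ PySem.List.pyRange a (PySem.Str.len genome - length + 1) 1).map (pvKmer genome length))) := by
  intro m
  induction m with
  | zero =>
    intro a ha hm
    have hnil : PySem.List.pyRange a (PySem.Str.len genome - length + 1) 1 = [] := by
      rw [PySem.List.pyRange_one]
      rw [hm]
      simp
    rw [hnil]
    simp
  | succ m ih =>
    intro a ha hm
    have haE : a < PySem.Str.len genome - length + 1 := by omega
    rw [PySem.List.pyRange_one_cons haE, List.foldl_cons]
    have hsplit : PySem.List.pyRange 0 a 1 ++ a :: PySem.List.pyRange (a + 1) (PySem.Str.len genome - length + 1) 1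
        = PySem.List.pyRange 0 (a + 1) 1 ++ PySem.List.pyRange (a + 1) (PySem.Str.len genome - length + 1) 1 := by
      rw [List.append_cons, ← PySem.List.pyRange_one_succ_right ha]
    by_cases hmem : pvKmer genome length a ∈
        PySem.Set.ofList ((PySem.List.pyRange 0 a 1).map (pvKmer genome length))
    · have hcont : PySem.Set.contains
          (PySem.Set.ofList ((PySem.List.pyRange 0 a 1).map (pvKmer genome length)))
          (pvKmer genome length a) = true := (PySem.Set.contains_iff _ _).mpr hmem
      have hstep : pvStepO genome length window counts
          ((PySem.Set.ofList ((PySem.List.pyRange 0 a 1).map (pvKmer genome length))).filter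
              (fun p => pvCondB length window counts (pvPos genome length p)),
            PySem.Set.ofList ((PySem.List.pyRange 0 a 1).map (pvKmer genome length))) a
          = ((PySem.Set.ofList ((PySem.List.pyRange 0 a 1).map (pvKmer genome length))).filter
              (fun p => pvCondB length window counts (pvPos genome length p)),
            PySem.Set.ofList ((PySem.List.pyRange 0 a 1).map (pvKmer genome length))) := by
        show (if PySem.Set.contains _ (pvKmer genome length a) = true then _ else _) = _
        rw [hcont]
        simp
      rw [hstep]
      have hS : PySem.Set.ofList ((PySem.List.pyRange 0 (a + 1) 1).map (pvKmer genome length))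
          = PySem.Set.ofList ((PySem.List.pyRange 0 a 1).map (pvKmer genome length)) := by
        rw [PySem.List.pyRange_one_succ_right ha, List.map_append, List.map_singleton,
          PySem.Set.ofList_append_singleton, PySem.Set.add_of_mem hmem]
      have := ih (a + 1) (by omega) (by omega)
      rw [hS] at this
      rw [hsplit]
      exact this
    · have hcont : PySem.Set.contains
          (PySem.Set.ofList ((PySem.List.pyRange 0 a 1).map (pvKmer genome length)))
          (pvKmer genome length a) = false := by
        rw [← Bool.not_eq_true]
        intro h
        exact hmem ((PySem.Set.contains_iff _ _).mp h)
      have hnotk : ∀ i ∈ PySem.List.pyRange 0 a 1, ¬ (pvKmer genome length i == pvKmer genome length a) = true := by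
        intro i hi h
        exact hmem ((PySem.Set.mem_ofList _ _).mpr (List.mem_map.mpr ⟨i, hi, beq_iff_eq.mp h⟩))
      have hpos : pvPos genome length (pvKmer genome length a)
          = (PySem.List.pyRange a (PySem.Str.len genome - length + 1) 1).filter
              (fun j => pvKmer genome length j == pvKmer genome length a) := by
        unfold pvPos pvRangeE
        rw [PySem.List.pyRange_one_append 0 a (PySem.Str.len genome - length + 1) ha (le_of_lt haE)]
        rw [List.filter_append, List.filter_eq_nil_iff.mpr hnotk, List.nil_append]
      have hinner : ((PySem.List.pyRange a (PySem.Str.len genome - length + 1) 1).foldl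
            (altStep2 genome length window counts (pvKmer genome length a)) ([], false)).2
          = pvCondB length window counts (pvPos genome length (pvKmer genome length a)) := by
        rw [Bool.eq_iff_iff, pvCondB_iff]
        rw [inner_iff genome length window counts (pvKmer genome length a) hc _ []]
        rw [List.nil_append]
        rw [← hpos]
        unfold pvCond
        simp only [List.length_nil, Nat.cast_zero]
      have hstep : pvStepO genome length window counts
          ((PySem.Set.ofList ((PySem.List.pyRange 0 a 1).map (pvKmer genome length))).filter
              (fun p => pvCondB length window counts (pvPos genome length p)),
            PySem.Set.ofList ((PySem.List.pyRange 0 a 1).map (pvKmer genome length))) a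
          = ((if pvCondB length window counts (pvPos genome length (pvKmer genome length a)) then
                PySem.Set.add
                  ((PySem.Set.ofList ((PySem.List.pyRange 0 a 1).map (pvKmer genome length))).filter
                    (fun p => pvCondB length window counts (pvPos genome length p)))
                  (pvKmer genome length a)
              else
                (PySem.Set.ofList ((PySem.List.pyRange 0 a 1).map (pvKmer genome length))).filter
                  (fun p => pvCondB length window counts (pvPos genome length p))),
             PySem.Set.add (PySem.Set.ofList ((PySem.List.pyRange 0 a 1).map (pvKmer genome length)))
               (pvKmer genome length a)) := by
        show (if PySem.Set.contains _ (pvKmer genome length a) = true then _ else _) = _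
        rw [hcont]
        simp only [Bool.false_eq_true, if_false]
        rw [hinner]
      rw [hstep]
      have hSnew : PySem.Set.ofList ((PySem.List.pyRange 0 (a + 1) 1).map (pvKmer genome length))
          = PySem.Set.ofList ((PySem.List.pyRange 0 a 1).map (pvKmer genome length))
              ++ [pvKmer genome length a] := by
        rw [PySem.List.pyRange_one_succ_right ha, List.map_append, List.map_singleton,
          PySem.Set.ofList_append_singleton, PySem.Set.add_of_not_mem hmem]
      have hclump : (if pvCondB length window counts (pvPos genome length (pvKmer genome length a)) then
              PySem.Set.add
                ((PySem.Set.ofList ((PySem.List.pyRange 0 a 1).map (pvKmer genome length))).filter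
                  (fun p => pvCondB length window counts (pvPos genome length p)))
                (pvKmer genome length a)
            else
              (PySem.Set.ofList ((PySem.List.pyRange 0 a 1).map (pvKmer genome length))).filter
                (fun p => pvCondB length window counts (pvPos genome length p)))
          = (PySem.Set.ofList ((PySem.List.pyRange 0 (a + 1) 1).map (pvKmer genome length))).filter
              (fun p => pvCondB length window counts (pvPos genome length p)) := by
        rw [hSnew, List.filter_append]
        by_cases hcb : pvCondB length window counts (pvPos genome length (pvKmer genome length a)) = true
        · rw [if_pos hcb]
          rw [PySem.Set.add_of_not_mem (fun h => hmem (List.mem_of_mem_filter h))]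
          simp [hcb]
        · rw [if_neg (by simpa using hcb)]
          simp [hcb]
      rw [hclump]
      have hseen : PySem.Set.add (PySem.Set.ofList ((PySem.List.pyRange 0 a 1).map (pvKmer genome length)))
            (pvKmer genome length a)
          = PySem.Set.ofList ((PySem.List.pyRange 0 (a + 1) 1).map (pvKmer genome length)) := by
        rw [hSnew, PySem.Set.add_of_not_mem hmem]
      rw [hseen]
      have := ih (a + 1) (by omega) (by omega)
      rw [hsplit]
      exact this

theorem alt_eq_filter (genome : String) (length window counts : Int) (hc : 1 ≤ counts) :
    fast_clump_finding_alt genome length window counts =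
      (PySem.Set.ofList ((pvRangeE genome length).map (pvKmer genome length))).filter
        (fun p => pvCondB length window counts (pvPos genome length p)) := by
  have h0 : fast_clump_finding_alt genome length window counts
      = ((PySem.List.pyRange 0 (PySem.Str.len genome - length + 1) 1).foldl
          (pvStepO genome length window counts)
          ((PySem.Set.ofList ((PySem.List.pyRange 0 0 1).map (pvKmer genome length))).filter
              (fun p => pvCondB length window counts (pvPos genome length p)),
            PySem.Set.ofList ((PySem.List.pyRange 0 0 1).map (pvKmer genome length)))).1 := rfl
  rw [h0, outer_inv genome length window counts hc (PySem.Str.len genome - length + 1 - 0).toNat 0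
    (le_refl 0) rfl]
  have : PySem.List.pyRange 0 0 1 = [] := rfl
  rw [this, List.nil_append]
  rfl

theorem cond_iff (genome : String) (length window counts : Int) (hc : 1 ≤ counts) (p : String) :
    (decide (counts ≤ ((pvPos genome length p).length : Int)) &&
       is_clump (pvPos genome length p) length window counts) =
      pvCondB length window counts (pvPos genome length p) := by
  rw [Bool.eq_iff_iff, pvCondB_iff]
  simp only [Bool.and_eq_true, decide_eq_true_eq]
  unfold is_clump pvCond
  simp only [List.any_eq_true, PySem.List.mem_pyRange_one, decide_eq_true_eq]
  constructor
  · rintro ⟨hlen, i, ⟨hi0, hi1⟩, hle⟩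
    refine ⟨i + counts - 1, by omega, by omega, by omega, ?_⟩
    rw [show i + counts - 1 + 1 - counts = i from by ring]
    exact hle
  · rintro ⟨k, h0, h1, h2, h3⟩
    refine ⟨by omega, k + 1 - counts, ⟨by omega, by omega⟩, ?_⟩
    rw [show k + 1 - counts + counts - 1 = k from by ring]
    exact h3

-- ===== VERDICT (by name: the statement is the Claim_ definition above) =====
theorem fast_clump_finding_spec : Claim_equal_fast_clump_finding := by
  intro genome length window counts _ hpre
  unfold Spec_fast_clump_finding
  have hpre' : 1 ≤ counts ∨ PySem.Str.len genome - length + 1 ≤ 0 := by unfold Pre_fast_clump_finding at hpre; exact hpre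
  rcases hpre' with hc | hE
  · rw [fast_eq_filter, alt_eq_filter genome length window counts hc]
    exact List.filter_congr (fun p _ => cond_iff genome length window counts hc p)
  · have hnil : PySem.List.pyRange 0 (PySem.Str.len genome - length + 1) 1 = [] := by
      rw [PySem.List.pyRange_one,
        show (PySem.Str.len genome - length + 1 - 0).toNat = 0 from by omega]
      simp
    have hR : pvRangeE genome length = [] := hnil
    rw [fast_eq_filter, hR]
    have h0 : fast_clump_finding_alt genome length window counts
        = ((PySem.List.pyRange 0 (PySem.Str.len genome - length + 1) 1).foldl
            (pvStepO genome length window counts)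
            (([] : PySem.Set String), ([] : PySem.Set String))).1 := rfl
    rw [h0, hnil]
    rfl
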